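-- pv_equiv track=rewrite | github.com/Aiman-17/ai-employee-vault | src/watchers/finance_watcher.py | _normalise_row
-- ===== SOURCE A (Python) =====
-- _DATE_COLS = ["date", "transaction date", "completed date", "valuedate", "booking date"]
--
-- _AMOUNT_COLS = ["amount", "credit/debit", "debit", "credit", "withdrawal amount", "transaction amount"]
--
-- _DESC_COLS = ["description", "payee", "merchant", "narrative", "reference", "details", "memo"]
--
-- def _normalise_row(row: dict) -> dict | None:
--     """Normalise a csv.DictReader row to standard keys."""
--     row_lower = {k.strip().lower(): v for k, v in row.items()}
--     amount_val = next(
--         (row_lower[c] for c in _AMOUNT_COLS if c in row_lower),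
--         None,
--     )
--     if amount_val is None:
--         return None
--     return {
--         "date": next((row_lower[c] for c in _DATE_COLS if c in row_lower), ""),
--         "amount": amount_val.strip(),
--         "description": next((row_lower[c] for c in _DESC_COLS if c in row_lower), ""),
--     }
-- ===== SOURCE B (Python) =====
-- _DATE_COLS = ["date", "transaction date", "completed date", "valuedate", "booking date"]
--
-- _AMOUNT_COLS = ["amount", "credit/debit", "debit", "credit", "withdrawal amount", "transaction amount"]
--
-- _DESC_COLS = ["description", "payee", "merchant", "narrative", "reference", "details", "memo"]
--
--
-- def _alias_rank(key):
--     """Canonical field and priority rank for a normalised column name, else None."""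
--     for field, cols in (("date", _DATE_COLS), ("amount", _AMOUNT_COLS), ("description", _DESC_COLS)):
--         if key in cols:
--             return field, cols.index(key)
--     return None
--
--
-- def _normalise_row(row: dict) -> dict | None:
--     """Normalise a csv.DictReader row to standard keys (single pass, per-field best rank)."""
--     best_date = best_amount = best_desc = None  # each: (rank, value)
--     for k, v in row.items():
--         hit = _alias_rank(k.strip().lower())
--         if hit is None:
--             continue
--         field, rank = hit
--         if field == "date":
--             if best_date is None or rank <= best_date[0]:
--                 best_date = (rank, v)
--         elif field == "amount":
--             if best_amount is None or rank <= best_amount[0]: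
--                 best_amount = (rank, v)
--         else:
--             if best_desc is None or rank <= best_desc[0]:
--                 best_desc = (rank, v)
--     if best_amount is None:
--         return None
--     return {
--         "date": best_date[1] if best_date is not None else "",
--         "amount": best_amount[1].strip(),
--         "description": best_desc[1] if best_desc is not None else "",
--     }
-- ===== Notes on version B (the rewrite author's own statement) =====
-- stated objective: alternative
-- what changed: Instead of building a lowercased-key dict and scanning the three priority lists against it, B makes one pass over the row, classifying each normalised key via a reverse alias->(field,rank) lookup and keeping the lowest-ranked (ties: latest) value per canonical field.
import Mathlib
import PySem

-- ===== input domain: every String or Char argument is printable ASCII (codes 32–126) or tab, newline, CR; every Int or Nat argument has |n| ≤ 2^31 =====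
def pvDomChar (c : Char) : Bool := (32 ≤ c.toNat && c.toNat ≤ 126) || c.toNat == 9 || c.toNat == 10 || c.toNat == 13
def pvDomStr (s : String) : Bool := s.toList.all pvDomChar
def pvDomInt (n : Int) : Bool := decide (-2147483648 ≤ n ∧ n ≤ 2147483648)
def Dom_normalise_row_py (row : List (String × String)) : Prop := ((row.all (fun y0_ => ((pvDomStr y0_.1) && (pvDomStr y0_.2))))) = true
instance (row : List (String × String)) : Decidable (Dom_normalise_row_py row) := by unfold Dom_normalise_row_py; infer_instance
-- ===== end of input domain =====

-- B replaces A's row_lower dict + three priority-list scans by a reverse alias→(field,rank)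
-- lookup and ONE pass over the row keeping the best-ranked value per field (objective: alternative).

-- ===== PORT A =====
def pyDateCols : List String := ["date", "transaction date", "completed date", "valuedate", "booking date"]
def pyAmountCols : List String := ["amount", "credit/debit", "debit", "credit", "withdrawal amount", "transaction amount"]
def pyDescCols : List String := ["description", "payee", "merchant", "narrative", "reference", "details", "memo"]

-- next((row_lower[c] for c in cols if c in row_lower), default): first c present, its value
def normalise_row_py (row : List (String × String)) : Option (List (String × String)) :=
  let row_lower : PySem.Dict String String :=
    row.foldl (fun d kv => d.insert (PySem.Str.lower (PySem.Str.strip kv.1)) kv.2) PySem.Dict.empty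
  match pyAmountCols.findSome? (fun c => row_lower.get? c) with
  | none => none
  | some amount_val =>
      some [("date", (pyDateCols.findSome? (fun c => row_lower.get? c)).getD ""),
            ("amount", PySem.Str.strip amount_val),
            ("description", (pyDescCols.findSome? (fun c => row_lower.get? c)).getD "")]

-- ===== PORT B =====
-- _alias_rank(key): first group list containing key, with key's index there
def alias_rank (key : String) : Option (String × Nat) :=
  [("date", pyDateCols), ("amount", pyAmountCols), ("description", pyDescCols)].findSome?
    (fun p => if key ∈ p.2 then (PySem.List.index? p.2 key).map (fun i => (p.1, i)) else none)

-- "best is None or rank <= best[0]" update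
def bUpd (b : Option (Nat × String)) (rank : Nat) (v : String) : Option (Nat × String) :=
  match b with
  | none => some (rank, v)
  | some (r, _) => if rank ≤ r then some (rank, v) else b

def bStep (st : Option (Nat × String) × Option (Nat × String) × Option (Nat × String))
    (kv : String × String) :
    Option (Nat × String) × Option (Nat × String) × Option (Nat × String) :=
  match alias_rank (PySem.Str.lower (PySem.Str.strip kv.1)) with
  | none => st
  | some (field, rank) =>
      if field = "date" then (bUpd st.1 rank kv.2, st.2.1, st.2.2)
      else if field = "amount" then (st.1, bUpd st.2.1 rank kv.2, st.2.2)
      else (st.1, st.2.1, bUpd st.2.2 rank kv.2)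

def normalise_row_py_alt (row : List (String × String)) : Option (List (String × String)) :=
  let st := row.foldl bStep (none, none, none)
  match st.2.1 with
  | none => none
  | some ra =>
      some [("date", match st.1 with | none => "" | some rv => rv.2),
            ("amount", PySem.Str.strip ra.2),
            ("description", match st.2.2 with | none => "" | some rv => rv.2)]

-- ===== PRECONDITION & SPEC =====
def Spec_normalise_row_py (row : List (String × String)) (out : Option (List (String × String))) : Prop := out = normalise_row_py_alt row
instance (row : List (String × String)) (out : Option (List (String × String))) : Decidable (Spec_normalise_row_py row out) := by unfold Spec_normalise_row_py; infer_instance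

-- ===== CLAIM (what is proved, stated in full; the proofs are below) =====
def Claim_equal_normalise_row_py : Prop := ∀ (row : List (String × String)), Dom_normalise_row_py row → Spec_normalise_row_py row (normalise_row_py row)

-- ===== LEMMAS AND PROOFS =====

-- proof device: B's best-(rank,value) state for one priority list, as a function of A's dict
def specB (d : PySem.Dict String String) : List String → Option (Nat × String)
  | [] => none
  | c :: cs =>
    match d.get? c with
    | some v => some (0, v)
    | none => (specB d cs).map (fun p => (p.1 + 1, p.2))

theorem findSome?_eq_specB (d : PySem.Dict String String) (cols : List String) :
    cols.findSome? (fun c => d.get? c) = (specB d cols).map Prod.snd := by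
  induction cols with
  | nil => rfl
  | cons c cs ih =>
    cases h : d.get? c
    · rw [List.findSome?, specB, h, ih, Option.map_map]
      cases specB d cs <;> rfl
    · simp [List.findSome?, specB, h]

theorem specB_insert_not_mem (d : PySem.Dict String String) (k v : String)
    (cols : List String) (h : k ∉ cols) :
    specB (d.insert k v) cols = specB d cols := by
  induction cols with
  | nil => rfl
  | cons c cs ih =>
    simp only [List.mem_cons, not_or] at h
    rw [specB, specB, PySem.Dict.get?_insert_of_ne d v (Ne.symm h.1), ih h.2]

theorem specB_insert_mem (d : PySem.Dict String String) (k v : String)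
    (cols : List String) (i : Nat) (hi : PySem.List.index? cols k = some i) :
    specB (d.insert k v) cols = bUpd (specB d cols) i v := by
  induction cols generalizing i with
  | nil => rw [PySem.List.index?_eq_idxOf?] at hi; simp at hi
  | cons c cs ih =>
    by_cases hck : c = k
    · subst hck
      rw [PySem.List.index?_cons_self] at hi
      cases hi
      rw [specB, PySem.Dict.get?_insert_self]
      cases specB d (c :: cs) with
      | none => simp [bUpd]
      | some p => simp [bUpd]
    · rw [PySem.List.index?_cons_of_ne cs hck] at hi
      cases hj : PySem.List.index? cs k with
      | none => rw [hj] at hi; simp at hi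
      | some j =>
        rw [hj] at hi
        simp only [Option.map_some] at hi
        cases hi
        rw [specB, specB, PySem.Dict.get?_insert_of_ne d v hck]
        cases hc : d.get? c with
        | some w =>
          simp [bUpd]
        | none =>
          rw [ih j hj]
          cases hs : specB d cs with
          | none => simp [bUpd, hs]
          | some p =>
            simp only [bUpd, hs, Option.map_some]
            by_cases hjr : j ≤ p.1
            · rw [if_pos hjr, if_pos (by omega)]; rfl
            · rw [if_neg hjr, if_neg (by omega)]; rfl

-- the three alias lists are pairwise disjoint (finite check)
theorem date_not_amount : ∀ x ∈ pyDateCols, x ∉ pyAmountCols := by decide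
theorem date_not_desc : ∀ x ∈ pyDateCols, x ∉ pyDescCols := by decide
theorem amount_not_desc : ∀ x ∈ pyAmountCols, x ∉ pyDescCols := by decide

-- one-step invariant preservation
theorem step_inv (d : PySem.Dict String String)
    (st : Option (Nat × String) × Option (Nat × String) × Option (Nat × String))
    (kv : String × String)
    (h1 : st.1 = specB d pyDateCols) (h2 : st.2.1 = specB d pyAmountCols)
    (h3 : st.2.2 = specB d pyDescCols) :
    (bStep st kv).1 = specB (d.insert (PySem.Str.lower (PySem.Str.strip kv.1)) kv.2) pyDateCols ∧
    (bStep st kv).2.1 = specB (d.insert (PySem.Str.lower (PySem.Str.strip kv.1)) kv.2) pyAmountCols ∧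
    (bStep st kv).2.2 = specB (d.insert (PySem.Str.lower (PySem.Str.strip kv.1)) kv.2) pyDescCols := by
  set k := PySem.Str.lower (PySem.Str.strip kv.1) with hk
  by_cases hd : k ∈ pyDateCols
  · obtain ⟨i, hi⟩ := (PySem.List.index?_isSome_iff pyDateCols k).mpr hd |> Option.isSome_iff_exists.mp
    have hna : k ∉ pyAmountCols := date_not_amount k hd
    have hnx : k ∉ pyDescCols := date_not_desc k hd
    have hi' := hi; rw [PySem.List.index?_eq_idxOf?] at hi'
    have har : alias_rank k = some ("date", i) := by
      simp [alias_rank, List.findSome?, hd, hi']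
    simp only [bStep]
    rw [← hk, har,
        specB_insert_mem d k kv.2 pyDateCols i hi,
        specB_insert_not_mem d k kv.2 pyAmountCols hna,
        specB_insert_not_mem d k kv.2 pyDescCols hnx]
    simp [h1, h2, h3]
  · by_cases ha : k ∈ pyAmountCols
    · obtain ⟨i, hi⟩ := (PySem.List.index?_isSome_iff pyAmountCols k).mpr ha |> Option.isSome_iff_exists.mp
      have hnx : k ∉ pyDescCols := amount_not_desc k ha
      have hi' := hi; rw [PySem.List.index?_eq_idxOf?] at hi'
      have har : alias_rank k = some ("amount", i) := by
        simp [alias_rank, List.findSome?, hd, ha, hi']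
      simp only [bStep]
      rw [← hk, har,
          specB_insert_not_mem d k kv.2 pyDateCols hd,
          specB_insert_mem d k kv.2 pyAmountCols i hi,
          specB_insert_not_mem d k kv.2 pyDescCols hnx]
      simp [h1, h2, h3]
    · by_cases hx : k ∈ pyDescCols
      · obtain ⟨i, hi⟩ := (PySem.List.index?_isSome_iff pyDescCols k).mpr hx |> Option.isSome_iff_exists.mp
        have hi' := hi; rw [PySem.List.index?_eq_idxOf?] at hi'
        have har : alias_rank k = some ("description", i) := by
          simp [alias_rank, List.findSome?, hd, ha, hx, hi']
        simp only [bStep]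
        rw [← hk, har,
            specB_insert_not_mem d k kv.2 pyDateCols hd,
            specB_insert_not_mem d k kv.2 pyAmountCols ha,
            specB_insert_mem d k kv.2 pyDescCols i hi]
        simp [h1, h2, h3]
      · have har : alias_rank k = none := by
          simp [alias_rank, List.findSome?, hd, ha, hx]
        simp only [bStep]
        rw [← hk, har,
            specB_insert_not_mem d k kv.2 pyDateCols hd,
            specB_insert_not_mem d k kv.2 pyAmountCols ha,
            specB_insert_not_mem d k kv.2 pyDescCols hx]
        exact ⟨h1, h2, h3⟩

theorem loop_inv (row : List (String × String)) :
    ∀ (d : PySem.Dict String String) st,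
      st.1 = specB d pyDateCols → st.2.1 = specB d pyAmountCols → st.2.2 = specB d pyDescCols →
      (row.foldl bStep st).1 = specB (row.foldl (fun d kv => d.insert (PySem.Str.lower (PySem.Str.strip kv.1)) kv.2) d) pyDateCols ∧
      (row.foldl bStep st).2.1 = specB (row.foldl (fun d kv => d.insert (PySem.Str.lower (PySem.Str.strip kv.1)) kv.2) d) pyAmountCols ∧
      (row.foldl bStep st).2.2 = specB (row.foldl (fun d kv => d.insert (PySem.Str.lower (PySem.Str.strip kv.1)) kv.2) d) pyDescCols := by
  induction row with
  | nil => intro d st h1 h2 h3; simp only [List.foldl_nil]; exact ⟨h1, h2, h3⟩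
  | cons kv rest ih =>
    intro d st h1 h2 h3
    obtain ⟨g1, g2, g3⟩ := step_inv d st kv h1 h2 h3
    simp only [List.foldl_cons]
    exact ih (d.insert (PySem.Str.lower (PySem.Str.strip kv.1)) kv.2) (bStep st kv) g1 g2 g3

theorem specB_empty (cols : List String) : specB PySem.Dict.empty cols = none := by
  induction cols with
  | nil => rfl
  | cons c cs ih => simp [specB, PySem.Dict.get?_empty, ih]

-- ===== VERDICT (by name: the statement is the Claim_ definition above) =====
theorem normalise_row_py_spec : Claim_equal_normalise_row_py := by
  intro row _
  simp only [Spec_normalise_row_py, normalise_row_py, normalise_row_py_alt]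
  obtain ⟨g1, g2, g3⟩ := loop_inv row PySem.Dict.empty (none, none, none)
    (specB_empty _).symm (specB_empty _).symm (specB_empty _).symm
  rw [findSome?_eq_specB, findSome?_eq_specB, findSome?_eq_specB, ← g1, ← g2, ← g3]
  cases (row.foldl bStep (none, none, none)).2.1 with
  | none => rfl
  | some ra =>
    cases (row.foldl bStep (none, none, none)).1 <;>
      cases (row.foldl bStep (none, none, none)).2.2 <;> rfl
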